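-- pv_equiv track=rewrite | github.com/asving/anthropic-fellows | scripts/kv_swap_rewind_historical.py | find_analysis_start
-- ===== SOURCE A (Python) =====
-- ANALYSIS_TRIGGERS = [
--     "now let me analyze",
--     "now, let me analyze",
--     "analyzing my response",
--     "let me examine",
--     "upon reflection",
--     "looking at my response",
--     "examining my response",
--     "checking for signs",
--     "analysis:",
--     "self-analysis",
--     "let me reflect",
--     "now i'll analyze",
--     "now i will analyze",
-- ]
--
-- def find_analysis_start(text: str) -> int:
--     """Find character position where analysis section starts."""
--     text_lower = text.lower()
--     earliest = len(text)
--     for trigger in ANALYSIS_TRIGGERS: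
--         pos = text_lower.find(trigger)
--         if pos != -1 and pos < earliest:
--             earliest = pos
--     return earliest if earliest < len(text) else -1
-- ===== SOURCE B (Python) =====
-- ANALYSIS_TRIGGERS = [
--     "now let me analyze",
--     "now, let me analyze",
--     "analyzing my response",
--     "let me examine",
--     "upon reflection",
--     "looking at my response",
--     "examining my response",
--     "checking for signs",
--     "analysis:",
--     "self-analysis",
--     "let me reflect",
--     "now i'll analyze",
--     "now i will analyze",
-- ]
--
--
-- def find_analysis_start(text: str) -> int:
--     """Single left-to-right scan: return the first position where any trigger starts."""
--     t = text.lower()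
--     for i in range(len(t)):
--         if any(t.startswith(trigger, i) for trigger in ANALYSIS_TRIGGERS):
--             return i
--     return -1
-- ===== Notes on version B (the rewrite author's own statement) =====
-- stated objective: alternative
-- what changed: Replaces 13 separate full-text str.find scans with a running minimum by a single left-to-right scan over positions that returns the first position where any trigger matches (early exit), with no minimum bookkeeping.
import Mathlib
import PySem

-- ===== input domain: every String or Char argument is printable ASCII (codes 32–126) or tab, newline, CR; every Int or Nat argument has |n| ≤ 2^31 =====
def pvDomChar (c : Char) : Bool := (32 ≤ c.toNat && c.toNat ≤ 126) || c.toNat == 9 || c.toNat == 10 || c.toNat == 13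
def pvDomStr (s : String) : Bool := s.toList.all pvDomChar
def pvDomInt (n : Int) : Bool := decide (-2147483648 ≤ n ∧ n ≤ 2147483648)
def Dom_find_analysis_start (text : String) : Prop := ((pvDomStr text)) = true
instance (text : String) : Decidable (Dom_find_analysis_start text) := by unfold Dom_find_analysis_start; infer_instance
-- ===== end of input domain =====

-- B replaces A's 13 full-text find scans + running minimum with a single left-to-right
-- scan returning the first position where any trigger matches (alternative decomposition).


def ANALYSIS_TRIGGERS : List String := [
  "now let me analyze",
  "now, let me analyze",
  "analyzing my response",
  "let me examine",
  "upon reflection",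
  "looking at my response",
  "examining my response",
  "checking for signs",
  "analysis:",
  "self-analysis",
  "let me reflect",
  "now i'll analyze",
  "now i will analyze"]

-- ===== PORT A =====
def find_analysis_start (text : String) : Int :=
  let text_lower := PySem.Str.lower text
  let earliest : Int :=
    ANALYSIS_TRIGGERS.foldl (fun earliest trigger =>
      let pos := PySem.Str.find text_lower trigger
      if pos ≠ -1 ∧ pos < earliest then pos else earliest) (PySem.Str.len text)
  if earliest < PySem.Str.len text then earliest else -1

-- ===== PORT B =====
-- scan over the suffixes of the lowered text; `t.startswith(trigger, i)` is exactly
-- "trigger.toList is a prefix of the i-th suffix", which is the list the recursion carries.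
def pvScan (l : List Char) (i : Nat) : Int :=
  match l with
  | [] => -1
  | c :: rest =>
      if ANALYSIS_TRIGGERS.any (fun t => t.toList.isPrefixOf (c :: rest)) then (i : Int)
      else pvScan rest (i + 1)

def find_analysis_start_alt (text : String) : Int :=
  pvScan (PySem.Str.lower text).toList 0

-- ===== PRECONDITION & SPEC =====
def Spec_find_analysis_start (text : String) (out : Int) : Prop := out = find_analysis_start_alt text
instance (text : String) (out : Int) : Decidable (Spec_find_analysis_start text out) := by unfold Spec_find_analysis_start; infer_instance

-- ===== CLAIM (what is proved, stated in full; the proofs are below) =====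
def Claim_equal_find_analysis_start : Prop := ∀ (text : String), Dom_find_analysis_start text → Spec_find_analysis_start text (find_analysis_start text)

-- ===== LEMMAS AND PROOFS =====

-- A's fold, written over the lowered char list (the port reduces to this via Str.find_eq).
def pvFoldA (s : List Char) (ts : List String) (acc : Int) : Int :=
  ts.foldl (fun earliest trigger =>
    let pos := PySem.Chars.find s trigger.toList
    if pos ≠ -1 ∧ pos < earliest then pos else earliest) acc

theorem pvFoldA_le_acc (s : List Char) (ts : List String) (acc : Int) :
    pvFoldA s ts acc ≤ acc := by
  induction ts generalizing acc with
  | nil => simp [pvFoldA]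
  | cons t ts ih =>
      simp only [pvFoldA, List.foldl_cons]
      split_ifs with h
      · exact le_trans (ih _) (le_of_lt h.2)
      · exact ih _

theorem pvFoldA_le_find (s : List Char) (ts : List String) (acc : Int) :
    ∀ t ∈ ts, PySem.Chars.find s t.toList ≠ -1 → pvFoldA s ts acc ≤ PySem.Chars.find s t.toList := by
  induction ts generalizing acc with
  | nil => intro t h; simp at h
  | cons u ts ih =>
      intro t ht hne
      rcases List.mem_cons.mp ht with rfl | ht
      · simp only [pvFoldA, List.foldl_cons]
        split_ifs with h
        · exact pvFoldA_le_acc s ts _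
        · have : acc ≤ PySem.Chars.find s t.toList := by
            by_cases hlt : PySem.Chars.find s t.toList < acc
            · exact absurd ⟨hne, hlt⟩ h
            · omega
          exact le_trans (pvFoldA_le_acc s ts acc) this
      · simp only [pvFoldA, List.foldl_cons]
        split_ifs with h
        · exact ih _ t ht hne
        · exact ih _ t ht hne

theorem pvFoldA_mem (s : List Char) (ts : List String) (acc : Int) :
    pvFoldA s ts acc = acc ∨
      ∃ t ∈ ts, pvFoldA s ts acc = PySem.Chars.find s t.toList ∧ PySem.Chars.find s t.toList ≠ -1 := by
  induction ts generalizing acc with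
  | nil => left; simp [pvFoldA]
  | cons u ts ih =>
      simp only [pvFoldA, List.foldl_cons]
      split_ifs with h
      · rcases ih (PySem.Chars.find s u.toList) with h1 | ⟨t, ht, h1, h2⟩
        · right; exact ⟨u, List.mem_cons_self .., h1, h.1⟩
        · right; exact ⟨t, List.mem_cons_of_mem _ ht, h1, h2⟩
      · rcases ih acc with h1 | ⟨t, ht, h1, h2⟩
        · left; exact h1
        · right; exact ⟨t, List.mem_cons_of_mem _ ht, h1, h2⟩

-- every trigger is a nonempty string
theorem pvTriggers_ne_nil : ∀ t ∈ ANALYSIS_TRIGGERS, t.toList ≠ [] := by decide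

theorem pvScan_none (l : List Char) (i : Nat)
    (h : ∀ j, ¬ ∃ t ∈ ANALYSIS_TRIGGERS, t.toList <+: l.drop j) : pvScan l i = -1 := by
  induction l generalizing i with
  | nil => simp [pvScan]
  | cons c rest ih =>
      have hhit : ANALYSIS_TRIGGERS.any (fun t => t.toList.isPrefixOf (c :: rest)) = false := by
        rw [List.any_eq_false]
        intro t ht hp
        rw [List.isPrefixOf_iff_prefix] at hp
        exact h 0 ⟨t, ht, by simpa using hp⟩
      simp only [pvScan, hhit]
      simp only [Bool.false_eq_true, if_false]
      exact ih (i + 1) (fun j => by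
        have := h (j + 1)
        simpa using this)

theorem pvScan_some (l : List Char) (i k : Nat)
    (hk : ∃ t ∈ ANALYSIS_TRIGGERS, t.toList <+: l.drop k)
    (hmin : ∀ j < k, ¬ ∃ t ∈ ANALYSIS_TRIGGERS, t.toList <+: l.drop j) :
    pvScan l i = (i : Int) + (k : Int) := by
  induction l generalizing i k with
  | nil =>
      rcases hk with ⟨t, ht, hp⟩
      simp only [List.drop_nil] at hp
      exact absurd (List.prefix_nil.mp hp) (pvTriggers_ne_nil t ht)
  | cons c rest ih =>
      cases k with
      | zero =>
          have hhit : ANALYSIS_TRIGGERS.any (fun t => t.toList.isPrefixOf (c :: rest)) = true := by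
            rw [List.any_eq_true]
            rcases hk with ⟨t, ht, hp⟩
            exact ⟨t, ht, List.isPrefixOf_iff_prefix.mpr (by simpa using hp)⟩
          simp [pvScan, hhit]
      | succ k' =>
          have hhit : ANALYSIS_TRIGGERS.any (fun t => t.toList.isPrefixOf (c :: rest)) = false := by
            rw [List.any_eq_false]
            intro t ht hp
            rw [List.isPrefixOf_iff_prefix] at hp
            exact hmin 0 (Nat.succ_pos _) ⟨t, ht, by simpa using hp⟩
          simp only [pvScan, hhit]
          simp only [Bool.false_eq_true, if_false]
          have := ih (i + 1) k' (by simpa using hk)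
            (fun j hj => by
              have := hmin (j + 1) (by omega)
              simpa using this)
          rw [this]; push_cast; ring

theorem find_analysis_start_eq (text : String) :
    find_analysis_start text = find_analysis_start_alt text := by
  have hlen : ((PySem.Str.lower text).toList.length : Int) = (text.toList.length : Int) := by
    simp [PySem.Str.toList_lower, PySem.Chars.lower]
  set s := (PySem.Str.lower text).toList with hs
  have hA : find_analysis_start text =
      (if pvFoldA s ANALYSIS_TRIGGERS ((text.toList.length : Nat) : Int) < ((text.toList.length : Nat) : Int)
       then pvFoldA s ANALYSIS_TRIGGERS ((text.toList.length : Nat) : Int) else -1) := by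
    simp only [find_analysis_start, pvFoldA, PySem.Str.find_eq, PySem.Str.len_eq, hs]
  have hB : find_analysis_start_alt text = pvScan s 0 := rfl
  rw [hA, hB]
  set n : Int := ((text.toList.length : Nat) : Int) with hn
  set e := pvFoldA s ANALYSIS_TRIGGERS n with he
  by_cases hex : ∃ t ∈ ANALYSIS_TRIGGERS, t.toList <:+: s
  · obtain ⟨t0, ht0, hinf⟩ := hex
    have hne0 : PySem.Chars.find s t0.toList ≠ -1 :=
      (PySem.Chars.find_ne_neg_one_iff s t0.toList).mpr hinf
    have hle0 : e ≤ PySem.Chars.find s t0.toList := pvFoldA_le_find s _ n t0 ht0 hne0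
    have hfind_lt : ∀ t ∈ ANALYSIS_TRIGGERS, PySem.Chars.find s t.toList ≠ -1 →
        PySem.Chars.find s t.toList < (s.length : Int) := by
      intro t ht hne
      have hnn : 0 ≤ PySem.Chars.find s t.toList := by
        have := PySem.Chars.neg_one_le_find s t.toList; omega
      have hsp := (PySem.Chars.find_spec (s := s) (sub := t.toList) hnn).1
      have hle := PySem.Chars.find_le_length s t.toList
      by_contra hge
      have hEq : (PySem.Chars.find s t.toList).toNat = s.length := by omega
      rw [hEq, List.drop_length] at hsp
      exact pvTriggers_ne_nil t ht (List.prefix_nil.mp hsp)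
    rcases pvFoldA_mem s ANALYSIS_TRIGGERS n with hcase | ⟨t1, ht1, he1, hne1⟩
    · exfalso
      have := hfind_lt t0 ht0 hne0
      rw [← he] at hcase
      omega
    · rw [← he] at he1
      have hnn1 : 0 ≤ PySem.Chars.find s t1.toList := by
        have := PySem.Chars.neg_one_le_find s t1.toList; omega
      have hlt1 : e < n := by
        have := hfind_lt t1 ht1 hne1; omega
      have henn : 0 ≤ e := by omega
      have hsp1 := PySem.Chars.find_spec (s := s) (sub := t1.toList) hnn1
      have hscan : pvScan s 0 = (0 : Int) + (e.toNat : Int) := by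
        apply pvScan_some
        · exact ⟨t1, ht1, by rw [he1]; exact hsp1.1⟩
        · rintro j hj ⟨t, ht, hp⟩
          have hinfj : t.toList <:+: s :=
            hp.isInfix.trans (List.drop_suffix j s).isInfix
          have hnej : PySem.Chars.find s t.toList ≠ -1 :=
            (PySem.Chars.find_ne_neg_one_iff s t.toList).mpr hinfj
          have hnnj : 0 ≤ PySem.Chars.find s t.toList := by
            have := PySem.Chars.neg_one_le_find s t.toList; omega
          have hspj := (PySem.Chars.find_spec (s := s) (sub := t.toList) hnnj).2
          have hjge : (PySem.Chars.find s t.toList).toNat ≤ j := by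
            by_contra hcon
            exact hspj j (by omega) hp
          have hlej : e ≤ PySem.Chars.find s t.toList := pvFoldA_le_find s _ n t ht hnej
          omega
      rw [hscan, if_pos hlt1]
      omega
  · have hall : ∀ t ∈ ANALYSIS_TRIGGERS, PySem.Chars.find s t.toList = -1 := by
      intro t ht
      exact (PySem.Chars.find_eq_neg_one_iff s t.toList).mpr (fun h => hex ⟨t, ht, h⟩)
    have hcase : e = n := by
      rcases pvFoldA_mem s ANALYSIS_TRIGGERS n with h | ⟨t1, ht1, _, hne1⟩
      · rw [he]; exact h
      · exact absurd (hall t1 ht1) hne1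
    have hscan : pvScan s 0 = -1 := by
      apply pvScan_none
      rintro j ⟨t, ht, hp⟩
      exact hex ⟨t, ht, hp.isInfix.trans (List.drop_suffix j s).isInfix⟩
    rw [hscan, hcase, if_neg (lt_irrefl n)]

-- ===== VERDICT (by name: the statement is the Claim_ definition above) =====
theorem find_analysis_start_spec : Claim_equal_find_analysis_start := by
  intro text _
  exact find_analysis_start_eq text
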